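/-
  jsmn: transport lemmas for the relation between memory and the model's state (Prog/Jsmn/Specs.lean: ParserAt, TokAt, TokensAt).
    X.frame          `X μ …` and `μ`, `ν` agree on X's bytes → `X ν …`   (registered as `v3_frame` rules: `v3_frame h` moves them through stores elsewhere)
    TokensAt.update  the array after stores INSIDE ONE token's record: every other token is kept; the new record is proved field by field (`v3_read`)
    Holds32 facts    the 32-bit pattern of an `int`
-/
import Prog.Jsmn.Specs

namespace X86
namespace J6
open X86.User (CodeAt RegsKept Span FlagsOK Layout toNat_add_ofNat toNat_ofNat_lt' add_ofNat_add)
open Jsmn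

theorem ParserAt.frame {μ ν : User.Mem} {pa : Word} {p : Parser} (h : ParserAt μ pa p) (he : User.Mem.EqOn pa.toNat (pa.toNat + 12) μ ν)
    (hlt : pa.toNat + 12 < 2 ^ 64) : ParserAt ν pa p := by
  have e4 : (pa + 4).toNat = pa.toNat + 4 := by word_omega
  have e8 : (pa + 8).toNat = pa.toNat + 8 := by word_omega
  refine ⟨?_, ?_, ?_⟩
  · rw [he.readLE pa 4 (by omega) (by omega) (by omega)]; exact h.pos
  · rw [he.readLE (pa + 4) 4 (by omega) (by omega) (by omega)]; exact h.toknext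
  · rw [he.readLE (pa + 8) 4 (by omega) (by omega) (by omega)]; exact h.toksuper

theorem TokAt.frame {cfg : Jsmn.Config} {μ ν : User.Mem} {a : Word} {t : Token} (h : TokAt cfg μ a t)
    (he : User.Mem.EqOn a.toNat (a.toNat + cfg.tokSize) μ ν) (hlt : a.toNat + cfg.tokSize < 2 ^ 64) : TokAt cfg ν a t := by
  have hs : 16 ≤ cfg.tokSize := by unfold Jsmn.Config.tokSize; split <;> omega
  have e4 : (a + 4).toNat = a.toNat + 4 := by word_omega
  have e8 : (a + 8).toNat = a.toNat + 8 := by word_omega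
  have e12 : (a + 12).toNat = a.toNat + 12 := by word_omega
  refine ⟨?_, ?_, ?_, ?_, ?_⟩
  · rw [he.readLE a 4 (by omega) (by omega) (by omega)]; exact h.type
  · rw [he.readLE (a + 4) 4 (by omega) (by omega) (by omega)]; exact h.start
  · rw [he.readLE (a + 8) 4 (by omega) (by omega) (by omega)]; exact h.«end»
  · rw [he.readLE (a + 12) 4 (by omega) (by omega) (by omega)]; exact h.size
  · intro hl
    have hs' : cfg.tokSize = 20 := by unfold Jsmn.Config.tokSize; rw [hl]; rfl
    have e16 : (a + 16).toNat = a.toNat + 16 := by word_omega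
    rw [he.readLE (a + 16) 4 (by omega) (by omega) (by omega)]; exact h.parent hl

/-- Where `tokens[i]` is, as a number. -/
theorem tokAddr_toNat (cfg : Jsmn.Config) (tb : Word) (i : Nat) (h : tb.toNat + cfg.tokSize * i < 2 ^ 64) :
    (tokAddr cfg tb i).toNat = tb.toNat + cfg.tokSize * i := by
  unfold tokAddr
  have : cfg.tokSize * i < 2 ^ 64 := by omega
  word_omega

theorem tokSize_mul_le (cfg : Jsmn.Config) {i n : Nat} (h : i < n) : cfg.tokSize * i + cfg.tokSize ≤ cfg.tokSize * n := by
  have : cfg.tokSize * (i + 1) ≤ cfg.tokSize * n := Nat.mul_le_mul_left _ h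
  rw [Nat.mul_succ] at this; exact this

theorem TokensAt.frame {cfg : Jsmn.Config} {μ ν : User.Mem} {tb : Word} {ts : Tokens} (h : TokensAt cfg μ tb ts)
    (he : User.Mem.EqOn tb.toNat (tb.toNat + cfg.tokSize * ts.length) μ ν) (hlt : tb.toNat + cfg.tokSize * ts.length < 2 ^ 64) :
    TokensAt cfg ν tb ts := by
  intro i hi
  have := tokSize_mul_le cfg hi
  have ea := tokAddr_toNat cfg tb i (by omega)
  exact (h i hi).frame (he.mono (by omega) (by omega)) (by omega)

/-- **One token's record rewritten**: memory `ν` agrees with `μ` on the array below and above `tokens[i]`, and holds `t'` there. -/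
theorem TokensAt.update {cfg : Jsmn.Config} {μ ν : User.Mem} {tb : Word} {ts : Tokens} {i : Nat} {t' : Token} (h : TokensAt cfg μ tb ts)
    (hi : i < ts.length) (hlt : tb.toNat + cfg.tokSize * ts.length < 2 ^ 64)
    (hlo : User.Mem.EqOn tb.toNat (tb.toNat + cfg.tokSize * i) μ ν)
    (hhi : User.Mem.EqOn (tb.toNat + cfg.tokSize * i + cfg.tokSize) (tb.toNat + cfg.tokSize * ts.length) μ ν)
    (ht : TokAt cfg ν (tokAddr cfg tb i) t') : TokensAt cfg ν tb (ts.set i t') := by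
  intro j hj
  rw [List.length_set] at hj
  by_cases hji : j = i
  · subst hji; rw [List.getElem_set_self]; exact ht
  · rw [List.getElem_set_ne (Ne.symm hji)]
    have hjn := tokSize_mul_le cfg hj
    have ea := tokAddr_toNat cfg tb j (by omega)
    rcases Nat.lt_or_gt_of_ne hji with hlt' | hgt
    · have := tokSize_mul_le cfg hlt'
      exact (h j hj).frame (hlo.mono (by omega) (by omega)) (by omega)
    · have : cfg.tokSize * i + cfg.tokSize ≤ cfg.tokSize * j := tokSize_mul_le cfg hgt
      exact (h j hj).frame (hhi.mono (by omega) (by omega)) (by omega)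

/-- `tokens[i]` read from the relation, with `getD`. -/
theorem TokensAt.getD {cfg : Jsmn.Config} {μ : User.Mem} {tb : Word} {ts : Tokens} (h : TokensAt cfg μ tb ts) (i : Nat) (hi : i < ts.length) :
    TokAt cfg μ (tokAddr cfg tb i) (ts.getD i default) := by
  have : ts.getD i default = ts[i] := by simp [List.getD, hi]
  rw [this]; exact h i hi

/-! ### The 32-bit pattern of an `int` -/

theorem u32_lt (x : Int) : u32 x < 4294967296 := by unfold u32; omega
theorem i32_range (x : Int) : -2147483648 ≤ i32 x ∧ i32 x < 2147483648 := by unfold i32; omega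
theorem holds32_i32 (x : Int) : Holds32 (u32 x) (i32 x) := by
  unfold Holds32 u32 i32; omega
theorem holds32_of_range (x : Int) (h1 : -2147483648 ≤ x) (h2 : x < 2147483648) : Holds32 (u32 x) x := ⟨rfl, h1, h2⟩
theorem holds32_neg1 : Holds32 4294967295 (-1) := by unfold Holds32 u32; omega
theorem holds32_zero : Holds32 0 0 := by unfold Holds32 u32; omega

/-- An `int` field that no store touched. -/
theorem holds32_frame {μ ν : User.Mem} {a : Word} {x : Int} (h : Holds32 (μ.readLE a 4) x) (he : User.Mem.EqOn a.toNat (a.toNat + 4) μ ν)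
    (hlt : a.toNat + 4 < 2 ^ 64) : Holds32 (ν.readLE a 4) x := by
  rw [he.readLE a 4 (by omega) (by omega) hlt]; exact h

/-- An `int` field just written: `refine holds32_read (by v3_read) ?_` leaves `Holds32 <the number stored> x`. -/
theorem holds32_read {μ : User.Mem} {a : Word} {raw : Nat} {x : Int} (hr : μ.readLE a 4 = raw) (h : Holds32 raw x) : Holds32 (μ.readLE a 4) x := by
  rw [hr]; exact h

/-- The `tokens` argument (NULL or an array) in a memory that agrees with the old one on the array's bytes. -/
theorem ToksArg.frame {cfg : Jsmn.Config} {μ ν : User.Mem} {tb : Word} {numTokens : Nat} {toks : Option Tokens}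
    (h : ToksArg cfg μ tb numTokens toks) (he : User.Mem.EqOn tb.toNat (tb.toNat + toksBytes cfg numTokens toks) μ ν)
    (hlt : tb.toNat + toksBytes cfg numTokens toks < 2 ^ 64) : ToksArg cfg ν tb numTokens toks := by
  cases toks with
  | none => exact h
  | some ts =>
    obtain ⟨h0, hl, ht⟩ := h
    simp only [toksBytes] at he hlt
    exact ⟨h0, hl, ht.frame (by rw [hl]; exact he) (by rw [hl]; exact hlt)⟩

end J6
end X86

macro_rules
  | `(tactic| v3_frame_rule $h) => `(tactic| first
    | (with_reducible refine X86.J6.ParserAt.frame $h ?eqon ?side)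
    | (with_reducible refine X86.J6.TokensAt.frame $h ?eqon ?side)
    | (with_reducible refine X86.J6.TokAt.frame $h ?eqon ?side)
    | (with_reducible refine X86.J6.holds32_frame $h ?eqon ?side)
    | (with_reducible refine X86.J6.ToksArg.frame $h ?eqon ?side))
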